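-- pv_equiv track=rewrite | github.com/IlyaLab/BNMPy | src/BNMPy/BMatrix.py | get_gene_dict
-- ===== SOURCE A (Python) =====
-- def get_gene_dict(equations):
--     left_side = []
--
--     for equation in equations:
--         parts = equation.split('=')
--         value = parts[0].strip()
--         if value not in left_side:
--             left_side.append(value)
--
--     genes = left_side
--
--     # making a dictionary for the genes starting from 0
--     gene_dict = {gene: i for i, gene in enumerate(genes)}
--     return(gene_dict)
-- ===== SOURCE B (Python) =====
-- def get_gene_dict(equations):
--     # Each distinct LHS name's index is the number of distinct names that
--     # appear strictly before its first occurrence: computed per element from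
--     # the prefix, with no running accumulator or dedup list.
--     names = [eq.split('=')[0].strip() for eq in equations]
--     return {name: len(set(names[:i]))
--             for i, name in enumerate(names)
--             if name not in names[:i]}
-- ===== Notes on version B (the rewrite author's own statement) =====
-- stated objective: alternative
-- what changed: Instead of A's mutated dedup list plus a trailing enumerate pass, B computes each name's index as a closed-form function of the input prefix (len(set(names[:i])) at the first occurrence, i.e. the count of distinct earlier names) inside one dict comprehension, with no running accumulator.
import Mathlib
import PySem

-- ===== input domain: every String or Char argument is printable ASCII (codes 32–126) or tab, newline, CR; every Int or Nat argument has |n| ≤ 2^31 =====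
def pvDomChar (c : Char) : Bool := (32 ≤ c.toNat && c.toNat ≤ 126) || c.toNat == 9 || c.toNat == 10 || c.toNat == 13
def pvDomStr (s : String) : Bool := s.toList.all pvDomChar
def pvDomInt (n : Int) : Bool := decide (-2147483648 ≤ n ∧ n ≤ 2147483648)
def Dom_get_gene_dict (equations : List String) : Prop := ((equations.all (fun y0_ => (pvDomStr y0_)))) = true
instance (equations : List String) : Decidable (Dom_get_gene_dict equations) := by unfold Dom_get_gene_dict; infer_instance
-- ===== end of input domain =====

-- B drops A's running dedup list: each name's index is the closed-form count of
-- distinct names in the input pre before its first occurrence (alternative decomposition).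

-- ===== PORT A =====
-- equation.split('=')[0]: split('=') always returns a nonempty list, so [0] is its head.
def get_gene_dict (equations : List String) : List (String × Int) :=
  let left_side := equations.foldl (fun ls equation =>
    let value := PySem.Str.strip ((((PySem.Str.split? equation "=").getD [])).headD "")
    if value ∈ ls then ls else ls ++ [value]) []
  (PySem.List.enumerate left_side 0).map (fun p => (p.2, p.1))

-- ===== PORT B =====
def get_gene_dict_alt (equations : List String) : List (String × Int) :=
  let names := equations.map (fun eq =>
    PySem.Str.strip ((((PySem.Str.split? eq "=").getD [])).headD ""))
  ((PySem.List.enumerate names 0).foldl (fun d p =>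
      if p.2 ∈ PySem.List.slice names none (some p.1) then d
      else d.insert p.2
        ((PySem.Set.ofList (PySem.List.slice names none (some p.1))).length : Int))
    PySem.Dict.empty).items

-- ===== PRECONDITION & SPEC =====
def Spec_get_gene_dict (equations : List String) (out : List (String × Int)) : Prop := out = get_gene_dict_alt equations
instance (equations : List String) (out : List (String × Int)) : Decidable (Spec_get_gene_dict equations out) := by unfold Spec_get_gene_dict; infer_instance

-- ===== CLAIM (what is proved, stated in full; the proofs are below) =====
def Claim_equal_get_gene_dict : Prop := ∀ (equations : List String), Dom_get_gene_dict equations → Spec_get_gene_dict equations (get_gene_dict equations)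

-- ===== LEMMAS AND PROOFS =====

-- B's fold over the enumerated suffix, starting from the dict holding the enumerated
-- dedup of the pre, ends in the enumerated dedup of the whole list.
theorem gene_dict_inv (rest pre : List String) (d : PySem.Dict String Int)
    (h : d.items = (PySem.List.enumerate (PySem.Set.ofList pre) 0).map (fun p => (p.2, p.1))) :
    ((PySem.List.enumerate rest (pre.length : Int)).foldl (fun d p =>
        if p.2 ∈ PySem.List.slice (pre ++ rest) none (some p.1) then d
        else d.insert p.2
          ((PySem.Set.ofList (PySem.List.slice (pre ++ rest) none (some p.1))).length : Int)) d).items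
      = (PySem.List.enumerate (PySem.Set.ofList (pre ++ rest)) 0).map (fun p => (p.2, p.1)) := by
  induction rest generalizing pre d with
  | nil => simpa using h
  | cons x rest' ih =>
    rw [PySem.List.enumerate_cons, List.foldl_cons]
    have hslice : PySem.List.slice (pre ++ x :: rest') none (some (pre.length : Int)) = pre := by
      rw [PySem.List.slice_to_natCast]
      exact List.take_left
    have hkeys : d.keys = PySem.Set.ofList pre := by
      simp only [PySem.Dict.keys, h, List.map_map]
      calc ((PySem.List.enumerate (PySem.Set.ofList pre) 0).map
              ((fun p : (String × Int) => p.1) ∘ (fun p : Int × String => (p.2, p.1))))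
          = (PySem.List.enumerate (PySem.Set.ofList pre) 0).map (·.2) := rfl
        _ = PySem.Set.ofList pre := PySem.List.map_snd_enumerate _ 0
    by_cases hx : x ∈ pre
    · simp only [hslice, hx, if_pos]
      have h' : d.items
          = (PySem.List.enumerate (PySem.Set.ofList (pre ++ [x])) 0).map (fun p => (p.2, p.1)) := by
        rw [PySem.Set.ofList_append_singleton, PySem.Set.add_of_mem ((PySem.Set.mem_ofList _ _).mpr hx)]
        exact h
      have := ih (pre ++ [x]) d h'
      simpa [List.append_assoc, List.length_append] using this
    · simp only [hslice, hx, if_false]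
      have hxnot : x ∉ PySem.Set.ofList pre := fun hm => hx ((PySem.Set.mem_ofList _ _).mp hm)
      have hcont : d.contains x = false := by
        rw [PySem.Dict.contains_eq_decide_mem_keys, hkeys]
        simp [hxnot]
      have h' : (d.insert x ((PySem.Set.ofList pre).length : Int)).items
          = (PySem.List.enumerate (PySem.Set.ofList (pre ++ [x])) 0).map (fun p => (p.2, p.1)) := by
        rw [PySem.Dict.items_insert_of_not_contains d _ hcont, h,
            PySem.Set.ofList_append_singleton, PySem.Set.add_of_not_mem hxnot,
            PySem.List.enumerate_append]
        simp [PySem.List.enumerate_cons]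
      have := ih (pre ++ [x]) _ h'
      simpa [List.append_assoc, List.length_append] using this

-- A's inner loop over equations is set(names) built left to right.
theorem left_side_eq (equations : List String) :
    equations.foldl (fun ls equation =>
      let value := PySem.Str.strip ((((PySem.Str.split? equation "=").getD [])).headD "")
      if value ∈ ls then ls else ls ++ [value]) []
    = PySem.Set.ofList (equations.map (fun eq =>
        PySem.Str.strip ((((PySem.Str.split? eq "=").getD [])).headD ""))) := by
  rw [PySem.Set.ofList_eq_foldl, List.foldl_map]
  simp [PySem.Set.add_eq_ite]

-- ===== VERDICT (by name: the statement is the Claim_ definition above) =====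
theorem get_gene_dict_spec : Claim_equal_get_gene_dict := by
  intro equations _
  unfold Spec_get_gene_dict get_gene_dict get_gene_dict_alt
  rw [left_side_eq]
  exact (gene_dict_inv _ [] PySem.Dict.empty (by simp [PySem.Dict.empty, PySem.Set.ofList])).symm
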